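-- pv_equiv track=rewrite | github.com/AnniePawl/Anna-Interview-Prep | CodeWars/7kyu/arrays/find_duplicates.py | duplicates2
-- ===== SOURCE A (Python) =====
-- def duplicates2(arr):
--   duplicates = []
--   seen= []
--   for item in arr:
--     if item in seen and item not in duplicates:
--       duplicates.append(item)
--     seen.append(item)
--   return duplicates
-- ===== SOURCE B (Python) =====
-- def duplicates2(arr):
--   # index-table strategy: one enumerate pass records every element's positions,
--   # then duplicated elements are emitted sorted by their second-occurrence index
--   positions = {}
--   for i, x in enumerate(arr):
--     positions.setdefault(x, []).append(i)
--   pairs = [(idxs[1], x) for x, idxs in positions.items() if len(idxs) >= 2]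
--   pairs.sort(key=lambda p: p[0])
--   return [x for _, x in pairs]
-- ===== Notes on version B (the rewrite author's own statement) =====
-- stated objective: faster
-- what changed: Replaced the incremental seen/duplicates membership-scan loop by an index-table strategy: one enumerate pass groups each element's positions in a dict (setdefault), then elements with >= 2 positions are paired with their recorded second-occurrence index, sorted by that index, and emitted.
import Mathlib
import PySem

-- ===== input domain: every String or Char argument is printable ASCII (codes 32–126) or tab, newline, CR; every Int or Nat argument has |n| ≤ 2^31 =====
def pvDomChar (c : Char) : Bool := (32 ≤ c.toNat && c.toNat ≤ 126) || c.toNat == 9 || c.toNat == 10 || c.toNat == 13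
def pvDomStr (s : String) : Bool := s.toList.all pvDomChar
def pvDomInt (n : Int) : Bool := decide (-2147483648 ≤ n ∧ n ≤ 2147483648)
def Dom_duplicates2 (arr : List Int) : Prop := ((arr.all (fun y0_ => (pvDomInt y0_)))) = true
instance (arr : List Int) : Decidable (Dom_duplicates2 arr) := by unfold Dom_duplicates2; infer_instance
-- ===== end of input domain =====

-- B replaces A's quadratic seen/duplicates membership-scan loop by an index table built in one
-- enumerate pass plus a sort by second-occurrence index; measured asymptotically faster.


-- ===== PORT A =====
def duplicates2 (arr : List Int) : List Int :=
  (arr.foldl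
    (fun (st : List Int × List Int) item =>
      if st.2.contains item && !(st.1.contains item) then
        (st.1 ++ [item], st.2 ++ [item])
      else
        (st.1, st.2 ++ [item]))
    ([], [])).1

-- ===== PORT B =====
def duplicates2_alt (arr : List Int) : List Int :=
  -- positions.setdefault(x, []).append(i)  ==  positions[x] = positions.get(x, []) + [i]
  let positions : PySem.Dict Int (List Int) :=
    (PySem.List.enumerate arr 0).foldl
      (fun d p => d.modify p.2 [] (fun l => l ++ [p.1])) PySem.Dict.empty
  -- (idxs[1], x) for x, idxs in positions.items() if len(idxs) >= 2
  -- (idxs[1] is in range because the filter guarantees len(idxs) >= 2, so pyGetD's default is dead)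
  let pairs : List (Int × Int) :=
    (positions.items.filter (fun q => decide (2 ≤ q.2.length))).map
      (fun q => (PySem.List.pyGetD q.2 1 0, q.1))
  -- pairs.sort(key=lambda p: p[0]); return [x for _, x in pairs]
  (PySem.List.sorted pairs (fun p => p.1) false).map (fun p => p.2)

-- ===== PRECONDITION & SPEC =====
def Spec_duplicates2 (arr : List Int) (out : List Int) : Prop := out = duplicates2_alt arr
instance (arr : List Int) (out : List Int) : Decidable (Spec_duplicates2 arr out) := by unfold Spec_duplicates2; infer_instance

-- ===== CLAIM =====
def Claim_equal_duplicates2 : Prop := ∀ (arr : List Int), Dom_duplicates2 arr → Spec_duplicates2 arr (duplicates2 arr)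

-- ===== LEMMAS AND PROOFS =====

/-- A's loop body, named for the proofs (identical to the lambda in the port). -/
def stepA (st : List Int × List Int) (item : Int) : List Int × List Int :=
  if st.2.contains item && !(st.1.contains item) then
    (st.1 ++ [item], st.2 ++ [item])
  else
    (st.1, st.2 ++ [item])

/-- The second-occurrence pairs of `arr`: (i, arr[i]) kept iff arr[:i] counts arr[i] exactly once. -/
def secPairs (arr : List Int) : List (Int × Int) :=
  (PySem.List.enumerate arr 0).filter (fun p => (arr.take p.1.toNat).count p.2 == 1)

/-- The index list of `x` in `l` (what B's dict records under key `x`). -/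
def idxs (l : List Int) (x : Int) : List Int :=
  ((PySem.List.enumerate l 0).filter (fun p => p.2 == x)).map (fun p => p.1)

theorem duplicates2_eq_foldl (arr : List Int) :
    duplicates2 arr = (arr.foldl stepA ([], [])).1 := rfl

theorem loop_snd (l : List Int) : (l.foldl stepA ([], [])).2 = l := by
  induction l using List.reverseRecOn with
  | nil => rfl
  | append_singleton l a ih =>
    rw [List.foldl_append]
    simp only [List.foldl_cons, List.foldl_nil, stepA]
    split <;> simp [ih]

theorem loop_fst_mem (l : List Int) (x : Int) :
    x ∈ (l.foldl stepA ([], [])).1 ↔ 2 ≤ l.count x := by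
  induction l using List.reverseRecOn with
  | nil => simp
  | append_singleton l a ih =>
    rw [List.foldl_append]
    simp only [List.foldl_cons, List.foldl_nil, stepA, loop_snd]
    by_cases hx : x = a
    · subst hx
      by_cases h1 : x ∈ l
      · by_cases h2 : 2 ≤ l.count x
        · have : x ∈ (l.foldl stepA ([], [])).1 := ih.mpr h2
          simp [this, List.count_append]
          omega
        · have hmem : x ∉ (l.foldl stepA ([], [])).1 := fun h => h2 (ih.mp h)
          have h1' : 1 ≤ l.count x := List.one_le_count_iff.mpr h1
          simp [h1, hmem, List.count_append]
      · have h0 : l.count x = 0 := List.count_eq_zero.mpr h1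
        have hmem : x ∉ (l.foldl stepA ([], [])).1 := fun h =>
          absurd (ih.mp h) (by omega)
        simp [h1, List.count_append, h0, hmem]
    · have hc : (l ++ [a]).count x = l.count x := by
        simp [List.count_append, Ne.symm hx]
      rw [hc]
      split <;> simp [ih, hx]

/-- `secPairs` on a one-longer list: append `(len, a)` iff `l` counts `a` exactly once. -/
theorem secPairs_append (l : List Int) (a : Int) :
    secPairs (l ++ [a]) =
      secPairs l ++ (if l.count a = 1 then [((l.length : Int), a)] else []) := by
  unfold secPairs
  rw [PySem.List.enumerate_append, List.filter_append]
  congr 1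
  · refine List.filter_congr ?_
    intro p hp
    rw [PySem.List.mem_enumerate_iff] at hp
    obtain ⟨k, hk, hpe⟩ := hp
    subst hpe
    simp only [zero_add, Int.toNat_natCast]
    rw [List.take_append_of_le_length (le_of_lt hk)]
  · simp only [PySem.List.enumerate_cons, PySem.List.enumerate_nil, zero_add]
    have ht : (l ++ [a]).take ((l.length : Int)).toNat = l := by simp
    simp only [List.filter, ht]
    by_cases h : l.count a = 1
    · simp [h]
    · have hb : (List.count a l == 1) = false := beq_eq_false_iff_ne.mpr h
      rw [hb]; simp [h]

/-- A's accumulator is exactly the second components of `secPairs`. -/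
theorem loop_fst_eq_secPairs (l : List Int) :
    (l.foldl stepA ([], [])).1 = (secPairs l).map (fun p => p.2) := by
  induction l using List.reverseRecOn with
  | nil => rfl
  | append_singleton l a ih =>
    rw [List.foldl_append]
    simp only [List.foldl_cons, List.foldl_nil, stepA, loop_snd]
    rw [secPairs_append l a, List.map_append]
    by_cases h : l.count a = 1
    · have hmem : a ∈ l := List.one_le_count_iff.mp (by omega)
      have hnot : a ∉ (l.foldl stepA ([], [])).1 := fun hc => by
        have := (loop_fst_mem l a).mp hc; omega
      have hnot' : a ∉ (secPairs l).map (fun p => p.2) := ih ▸ hnot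
      simp [hmem, hnot', h, ih]
    · by_cases hm : a ∈ l
      · have h2 : 2 ≤ l.count a := by
          have := List.one_le_count_iff.mpr hm; omega
        have hin : a ∈ (l.foldl stepA ([], [])).1 := (loop_fst_mem l a).mpr h2
        rw [ih] at hin
        simp [hm, hin, h, ih]
      · simp [hm, h, ih]

/-- `idxs` on a one-longer list. -/
theorem idxs_append (l : List Int) (a x : Int) :
    idxs (l ++ [a]) x = idxs l x ++ (if a = x then [(l.length : Int)] else []) := by
  unfold idxs
  rw [PySem.List.enumerate_append, List.filter_append, List.map_append]
  congr 1
  simp only [PySem.List.enumerate_cons, PySem.List.enumerate_nil, zero_add, List.filter]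
  by_cases h : a = x
  · simp [h]
  · have hb : (a == x) = false := beq_eq_false_iff_ne.mpr h
    rw [hb]; simp [h]

theorem length_idxs (l : List Int) (x : Int) : (idxs l x).length = l.count x := by
  induction l using List.reverseRecOn with
  | nil => rfl
  | append_singleton l a ih =>
    rw [idxs_append]
    by_cases h : a = x
    · subst h; simp [List.count_append, ih]
    · simp [h, List.count_append, ih]

/-- The recorded second index is the second occurrence: if `l[:i]` counts `x` once and `l[i] = x`,
    then `idxs l x` has `i` at position 1. -/
theorem idxs_second (l : List Int) (x : Int) (i : Nat) (hi : i < l.length)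
    (hc : (l.take i).count x = 1) (hx : l[i] = x) :
    PySem.List.pyGetD (idxs l x) 1 0 = (i : Int) := by
  induction l using List.reverseRecOn with
  | nil => simp at hi
  | append_singleton l a ih =>
    rw [idxs_append, PySem.List.pyGetD_of_nonneg _ _ (by decide)]
    rcases Nat.lt_succ_iff_lt_or_eq.mp (by simpa using hi) with hlt | heq
    · have hx' : l[i] = x := by
        rw [← hx]; exact (List.getElem_append_left hlt).symm
      have hc' : (l.take i).count x = 1 := by
        rw [← hc, List.take_append_of_le_length (le_of_lt hlt)]
      have hxd : x ∈ l.drop i := by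
        rw [List.drop_eq_getElem_cons hlt, hx']; exact List.mem_cons_self
      have h2 : 2 ≤ (idxs l x).length := by
        rw [length_idxs]
        have h1' : 1 ≤ (l.drop i).count x := List.one_le_count_iff.mpr hxd
        have hsum : l.count x = (l.take i).count x + (l.drop i).count x := by
          rw [← List.count_append, List.take_append_drop]
        omega
      have hih := ih hlt hc' hx'
      rw [PySem.List.pyGetD_of_nonneg _ _ (by decide)] at hih
      rw [List.getD_append _ _ _ _ (by omega : (1:Int).toNat < (idxs l x).length)]
      exact hih
    · subst heq
      have hax : a = x := by simpa using hx
      have hcl : l.count x = 1 := by simpa using hc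
      have hlen : (idxs l x).length = 1 := by rw [length_idxs, hcl]
      obtain ⟨j, hj⟩ : ∃ j, idxs l x = [j] := by
        cases h : idxs l x with
        | nil => rw [h] at hlen; simp at hlen
        | cons j t =>
          cases t with
          | nil => exact ⟨j, rfl⟩
          | cons _ _ => rw [h] at hlen; simp at hlen
      simp [hj, hax]

/-- membership in the duplicated-element list: exactly the elements counted at least twice. -/
theorem mem_secPairs_snd (l : List Int) (x : Int) :
    x ∈ (secPairs l).map (fun p => p.2) ↔ 2 ≤ l.count x := by
  rw [← loop_fst_eq_secPairs]; exact loop_fst_mem l x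

theorem nodup_secPairs_snd (l : List Int) : ((secPairs l).map (fun p => p.2)).Nodup := by
  induction l using List.reverseRecOn with
  | nil => simp [secPairs]
  | append_singleton l a ih =>
    rw [secPairs_append, List.map_append]
    by_cases h : l.count a = 1
    · rw [if_pos h]
      refine List.Nodup.append ih (by simp) ?_
      intro y hy hy'
      simp only [List.map_cons, List.map_nil, List.mem_singleton] at hy'
      rw [hy'] at hy
      have := (mem_secPairs_snd l a).mp hy
      omega
    · simp [h, ih]

/-- Every second-occurrence pair carries its element's recorded second index. -/
theorem secPairs_fst (l : List Int) (p : Int × Int) (hp : p ∈ secPairs l) :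
    p = (PySem.List.pyGetD (idxs l p.2) 1 0, p.2) := by
  unfold secPairs at hp
  rw [List.mem_filter] at hp
  obtain ⟨hmem, hcnt⟩ := hp
  rw [PySem.List.mem_enumerate_iff] at hmem
  obtain ⟨k, hk, hpe⟩ := hmem
  subst hpe
  simp only [zero_add, Int.toNat_natCast] at hcnt ⊢
  rw [idxs_second l l[k] k hk (by simpa using hcnt) rfl]

/-- secPairs is strictly increasing in the index component. -/
theorem secPairs_pairwise (l : List Int) :
    (secPairs l).Pairwise (fun p q => p.1 < q.1) :=
  List.Pairwise.sublist List.filter_sublist (PySem.List.pairwise_lt_enumerate l 0)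


theorem main_eq (arr : List Int) : duplicates2 arr = duplicates2_alt arr := by
  have hexp : duplicates2_alt arr =
      (PySem.List.sorted
        ((((PySem.List.enumerate arr 0).foldl
            (fun d p => d.modify p.2 [] (fun l => l ++ [p.1])) PySem.Dict.empty).items.filter
            (fun q => decide (2 ≤ q.2.length))).map
          (fun q => (PySem.List.pyGetD q.2 1 0, q.1)))
        (fun p => p.1) false).map (fun p => p.2) := rfl
  rw [hexp]
  set positions : PySem.Dict Int (List Int) :=
    (PySem.List.enumerate arr 0).foldl
      (fun d p => d.modify p.2 [] (fun l => l ++ [p.1])) PySem.Dict.empty with hpos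
  -- the dict's value at k is the index list of k
  have hgetD : ∀ k, positions.getD k [] = idxs arr k := by
    intro k
    rw [hpos,
      show (fun (d : PySem.Dict Int (List Int)) (p : Int × Int) =>
          d.modify p.2 [] (fun l => l ++ [p.1])) =
        (fun d p => (fun (d' : PySem.Dict Int (List Int)) (q : Int × Int) =>
          d'.modify q.1 [] (fun l => l ++ [q.2])) d ((fun (p : Int × Int) => (p.2, p.1)) p)) from rfl,
      ← List.foldl_map (f := fun p : Int × Int => (p.2, p.1))
        (g := fun (d' : PySem.Dict Int (List Int)) (q : Int × Int) =>
          d'.modify q.1 [] (fun l => l ++ [q.2])),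
      PySem.Dict.getD_foldl_modify_append, PySem.Dict.getD_empty]
    unfold idxs
    rw [List.filter_map, List.map_map]
    rfl
  have hkeys : positions.keys = PySem.Set.ofList arr := by
    rw [hpos, PySem.Dict.keys_foldl_modify_key (PySem.List.enumerate arr 0) (fun p => p.2) []
        (fun d p => (fun l => l ++ [p.1])) PySem.Dict.empty, PySem.Dict.keys_empty,
      PySem.List.map_snd_enumerate]
    rfl
  have hnd : positions.keys.Nodup := by
    rw [hkeys]; exact PySem.Set.nodup_ofList arr
  have hitems : positions.items =
      (PySem.Set.ofList arr).map (fun k => (k, idxs arr k)) := by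
    rw [PySem.Dict.items_eq_map_keys positions hnd [], hkeys]
    exact List.map_congr_left (fun k _ => by rw [hgetD])
  rw [hitems, List.filter_map, List.map_map]
  -- pairs = elems_B.map g
  have hpred : ((fun q : Int × List Int => decide (2 ≤ q.2.length)) ∘
      (fun k => (k, idxs arr k))) = (fun k => decide (2 ≤ arr.count k)) := by
    funext k; simp [length_idxs]
  rw [hpred]
  -- elems perm
  have hperm : ((secPairs arr).map (fun p => p.2)).Perm
      ((PySem.Set.ofList arr).filter (fun k => decide (2 ≤ arr.count k))) := by
    refine (List.perm_ext_iff_of_nodup (nodup_secPairs_snd arr)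
      ((PySem.Set.nodup_ofList arr).filter _)).mpr ?_
    intro x
    rw [mem_secPairs_snd, List.mem_filter, PySem.Set.mem_ofList]
    constructor
    · intro h
      exact ⟨List.one_le_count_iff.mp (by omega), by simpa using h⟩
    · intro ⟨_, h⟩; simpa using h
  have hpairsperm : (secPairs arr).Perm
      (((PySem.Set.ofList arr).filter (fun k => decide (2 ≤ arr.count k))).map
        ((fun q : Int × List Int => (PySem.List.pyGetD q.2 1 0, q.1)) ∘ (fun k => (k, idxs arr k)))) := by
    have hsec : (secPairs arr) = ((secPairs arr).map (fun p => p.2)).map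
        ((fun q : Int × List Int => (PySem.List.pyGetD q.2 1 0, q.1)) ∘ (fun k => (k, idxs arr k))) := by
      rw [List.map_map]
      refine ((List.map_congr_left ?_).trans (List.map_id _)).symm
      intro p hp
      exact (secPairs_fst arr p hp).symm
    rw [hsec]
    exact hperm.map _
  rw [PySem.List.sorted_eq_of_perm_of_pairwise_lt _ (secPairs arr) _ hpairsperm (secPairs_pairwise arr)]
  rw [duplicates2_eq_foldl, loop_fst_eq_secPairs]

-- ===== VERDICT =====
theorem duplicates2_spec : Claim_equal_duplicates2 := by
  intro arr _
  unfold Spec_duplicates2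
  exact main_eq arr
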